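-- pv_equiv track=rewrite | github.com/SpongeFun0721/DataCompare | backend/app.py | _find_in_year_group
-- ===== SOURCE A (Python) =====
-- def _find_in_year_group(pdf_core_name: str, year_group: list[str]) -> str | None:
--     """
--     在年份组中查找匹配的核心文件名。
--
--     支持模糊匹配：
--     1. 精确匹配
--     2. 包含匹配
--     3. 前缀匹配
--     """
--     if pdf_core_name in year_group:
--         return pdf_core_name
--
--     for entry in year_group:
--         if pdf_core_name in entry or entry in pdf_core_name:
--             return entry
--
--     short_name = pdf_core_name[:10]
--     for entry in year_group:
--         if entry.startswith(short_name) or short_name in entry: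
--             return entry
--
--     return None
-- ===== SOURCE B (Python) =====
-- def _find_in_year_group(pdf_core_name: str, year_group: list[str]) -> str | None:
--     # Single pass: score each entry with a priority tier (1 exact, 2 substring
--     # either way, 3 short-prefix match) and keep the first entry of the lowest
--     # tier seen; strict '<' updates preserve first-in-tier tie-breaking.
--     short_name = pdf_core_name[:10]
--     best_prio = 4
--     best_entry = None
--     for entry in year_group:
--         if entry == pdf_core_name:
--             prio = 1
--         elif pdf_core_name in entry or entry in pdf_core_name:
--             prio = 2
--         elif entry.startswith(short_name) or short_name in entry:
--             prio = 3
--         else: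
--             continue
--         if prio < best_prio:
--             best_prio = prio
--             best_entry = entry
--     return best_entry
-- ===== Notes on version B (the rewrite author's own statement) =====
-- stated objective: alternative
-- what changed: Replaced A's exact-membership test plus two sequential scans of the list with a single pass that assigns each entry a priority tier (1 exact, 2 substring either way, 3 short-prefix) and keeps the first entry of the lowest tier via strict-< updates.
import Mathlib
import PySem

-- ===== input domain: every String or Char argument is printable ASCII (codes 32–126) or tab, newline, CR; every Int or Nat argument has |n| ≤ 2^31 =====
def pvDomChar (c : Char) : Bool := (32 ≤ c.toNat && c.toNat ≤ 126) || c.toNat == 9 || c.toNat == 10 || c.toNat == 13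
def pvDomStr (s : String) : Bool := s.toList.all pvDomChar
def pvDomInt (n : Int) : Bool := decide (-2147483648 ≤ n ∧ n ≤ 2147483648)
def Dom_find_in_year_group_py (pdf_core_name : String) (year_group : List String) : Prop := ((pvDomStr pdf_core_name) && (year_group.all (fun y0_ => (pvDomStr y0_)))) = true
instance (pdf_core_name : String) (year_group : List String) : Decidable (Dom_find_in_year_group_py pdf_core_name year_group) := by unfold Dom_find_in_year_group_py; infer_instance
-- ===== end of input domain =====

-- B replaces A's membership test plus two sequential scans by one priority-scored pass (alternative decomposition, same cost).


-- ===== PORT A =====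
-- for entry in year_group: if pdf_core_name in entry or entry in pdf_core_name: return entry
def pvScan2 (pdf_core_name : String) : List String → Option String
  | [] => none
  | entry :: rest =>
    if PySem.Str.isIn pdf_core_name entry || PySem.Str.isIn entry pdf_core_name then some entry
    else pvScan2 pdf_core_name rest

-- for entry in year_group: if entry.startswith(short_name) or short_name in entry: return entry
def pvScan3 (short_name : String) : List String → Option String
  | [] => none
  | entry :: rest =>
    if PySem.Str.startswith entry short_name || PySem.Str.isIn short_name entry then some entry
    else pvScan3 short_name rest

def find_in_year_group_py (pdf_core_name : String) (year_group : List String) : Option String :=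
  if pdf_core_name ∈ year_group then some pdf_core_name
  else match pvScan2 pdf_core_name year_group with
  | some entry => some entry
  | none =>
    let short_name := PySem.Str.slice pdf_core_name none (some 10)
    pvScan3 short_name year_group

-- ===== PORT B =====
def pvPrio (pdf_core_name short_name entry : String) : Option Nat :=
  if entry = pdf_core_name then some 1
  else if PySem.Str.isIn pdf_core_name entry || PySem.Str.isIn entry pdf_core_name then some 2
  else if PySem.Str.startswith entry short_name || PySem.Str.isIn short_name entry then some 3
  else none

def pvStep (pdf_core_name short_name : String) (acc : Nat × Option String) (entry : String) : Nat × Option String :=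
  match pvPrio pdf_core_name short_name entry with
  | none => acc
  | some prio => if prio < acc.1 then (prio, some entry) else acc

def find_in_year_group_py_alt (pdf_core_name : String) (year_group : List String) : Option String :=
  let short_name := PySem.Str.slice pdf_core_name none (some 10)
  (year_group.foldl (pvStep pdf_core_name short_name) (4, none)).2

-- ===== PRECONDITION & SPEC =====
def Spec_find_in_year_group_py (pdf_core_name : String) (year_group : List String) (out : Option String) : Prop := out = find_in_year_group_py_alt pdf_core_name year_group
instance (pdf_core_name : String) (year_group : List String) (out : Option String) : Decidable (Spec_find_in_year_group_py pdf_core_name year_group out) := by unfold Spec_find_in_year_group_py; infer_instance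

-- ===== CLAIM (what is proved, stated in full; the proofs are below) =====
def Claim_equal_find_in_year_group_py : Prop := ∀ (pdf_core_name : String) (year_group : List String), Dom_find_in_year_group_py pdf_core_name year_group → Spec_find_in_year_group_py pdf_core_name year_group (find_in_year_group_py pdf_core_name year_group)

-- ===== LEMMAS AND PROOFS =====

-- priorities are always >= 1
theorem pvPrio_pos (p s e : String) (pr : Nat) (h : pvPrio p s e = some pr) : 1 ≤ pr := by
  unfold pvPrio at h
  split_ifs at h
  all_goals injection h with h
  all_goals omega

-- an entry equal to p gets priority 1, and only such entries do
theorem pvPrio_eq_one (p s e : String) (he : e = p) : pvPrio p s e = some 1 := by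
  unfold pvPrio
  rw [if_pos he]

theorem pvPrio_ne_one (p s e : String) (he : e ≠ p) (pr : Nat) (h : pvPrio p s e = some pr) : 2 ≤ pr := by
  unfold pvPrio at h
  rw [if_neg he] at h
  split_ifs at h
  all_goals injection h with h
  all_goals omega

theorem pvIsIn_self (p : String) : PySem.Str.isIn p p = true := by
  rw [PySem.Str.isIn_iff_infix]

theorem pvPrio_of_cond2 (p s e : String) (he : e ≠ p)
    (hc : (PySem.Str.isIn p e || PySem.Str.isIn e p) = true) :
    pvPrio p s e = some 2 := by
  unfold pvPrio
  rw [if_neg he, if_pos hc]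

theorem pvPrio_of_not_cond2 (p s e : String) (he : e ≠ p)
    (hc : ¬ (PySem.Str.isIn p e || PySem.Str.isIn e p) = true) :
    pvPrio p s e = if (PySem.Str.startswith e s || PySem.Str.isIn s e) = true then some 3 else none := by
  unfold pvPrio
  rw [if_neg he, if_neg hc]

-- if every entry's priority is >= acc.1, the fold leaves acc unchanged
theorem pvFold_stable (p s : String) (l : List String) (acc : Nat × Option String)
    (h : ∀ e ∈ l, ∀ pr, pvPrio p s e = some pr → acc.1 ≤ pr) :
    l.foldl (pvStep p s) acc = acc := by
  induction l with
  | nil => rfl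
  | cons e rest ih =>
    have hstep : pvStep p s acc e = acc := by
      unfold pvStep
      cases hp : pvPrio p s e with
      | none => rfl
      | some pr =>
        have := h e (by simp) pr hp
        simp only
        rw [if_neg (Nat.not_lt.mpr this)]
    rw [List.foldl_cons, hstep]
    exact ih (fun e' he' pr hp => h e' (by simp [he']) pr hp)

-- tier 1: if p occurs in l and acc.1 >= 2, the fold ends at (1, some p)
theorem pvFold_mem (p s : String) (l : List String) (acc : Nat × Option String)
    (hm : p ∈ l) (ha : 2 ≤ acc.1) :
    l.foldl (pvStep p s) acc = (1, some p) := by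
  induction l generalizing acc with
  | nil => cases hm
  | cons e rest ih =>
    by_cases he : e = p
    · have hstep : pvStep p s acc e = (1, some p) := by
        unfold pvStep
        rw [pvPrio_eq_one p s e he]
        simp only
        rw [if_pos (by omega), he]
      rw [List.foldl_cons, hstep]
      exact pvFold_stable p s rest (1, some p)
        (fun e' _ pr hp => pvPrio_pos p s e' pr hp)
    · have hm' : p ∈ rest := by
        cases hm with
        | head => exact absurd rfl he
        | tail _ h => exact h
      have hstep2 : 2 ≤ (pvStep p s acc e).1 := by
        unfold pvStep
        cases hp : pvPrio p s e with
        | none => exact ha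
        | some pr =>
          have h2 := pvPrio_ne_one p s e he pr hp
          simp only
          by_cases hlt : pr < acc.1
          · rw [if_pos hlt]; exact h2
          · rw [if_neg hlt]; exact ha
      rw [List.foldl_cons]
      exact ih _ hm' hstep2

-- tier 2: p absent, first scan hits e => the fold ends with value some e (needs acc.1 >= 3)
theorem pvFold_scan2 (p s : String) (l : List String) (acc : Nat × Option String) (e : String)
    (hm : p ∉ l) (h2 : pvScan2 p l = some e) (ha : 3 ≤ acc.1) :
    (l.foldl (pvStep p s) acc).2 = some e := by
  induction l generalizing acc with
  | nil => simp [pvScan2] at h2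
  | cons x rest ih =>
    have hx : x ≠ p := fun hxp => hm (by simp [hxp])
    have hm' : p ∉ rest := fun hp => hm (by simp [hp])
    by_cases hc : (PySem.Str.isIn p x || PySem.Str.isIn x p) = true
    · have hxe : x = e := by
        unfold pvScan2 at h2
        rw [if_pos hc] at h2
        exact Option.some.inj h2
      have hstep : pvStep p s acc x = (2, some x) := by
        unfold pvStep
        rw [pvPrio_of_cond2 p s x hx hc]
        simp only
        rw [if_pos (by omega)]
      rw [List.foldl_cons, hstep]
      rw [pvFold_stable p s rest (2, some x)
        (fun e' he' pr hp => by
          by_cases hep : e' = p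
          · exact absurd (hep ▸ he') hm'
          · exact pvPrio_ne_one p s e' hep pr hp)]
      rw [hxe]
    · have h2' : pvScan2 p rest = some e := by
        unfold pvScan2 at h2
        rwa [if_neg hc] at h2
      have hstep3 : 3 ≤ (pvStep p s acc x).1 := by
        unfold pvStep
        rw [pvPrio_of_not_cond2 p s x hx hc]
        by_cases h3 : (PySem.Str.startswith x s || PySem.Str.isIn s x) = true
        · rw [if_pos h3]
          simp only
          by_cases hlt : 3 < acc.1
          · rw [if_pos hlt]
          · rw [if_neg hlt]; exact ha
        · rw [if_neg h3]; exact ha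
      rw [List.foldl_cons]
      exact ih _ hm' h2' hstep3

-- helper: scan2 = none means the tier-2 condition fails everywhere
theorem pvScan2_none (p : String) (l : List String) (h : pvScan2 p l = none) :
    ∀ e ∈ l, ¬ (PySem.Str.isIn p e || PySem.Str.isIn e p) = true := by
  induction l with
  | nil => simp
  | cons x rest ih =>
    unfold pvScan2 at h
    intro e he
    by_cases hc : (PySem.Str.isIn p x || PySem.Str.isIn x p) = true
    · rw [if_pos hc] at h; simp at h
    · rw [if_neg hc] at h
      cases he with
      | head => exact hc
      | tail _ h' => exact ih h e h'

-- every entry's priority is >= 3 when the tier-2 condition fails everywhere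
theorem pvPrio_ge_three (p s : String) (l : List String)
    (h : ∀ e ∈ l, ¬ (PySem.Str.isIn p e || PySem.Str.isIn e p) = true) :
    ∀ e ∈ l, ∀ pr, pvPrio p s e = some pr → 3 ≤ pr := by
  intro e he pr hp
  have hec := h e he
  have hep : e ≠ p := fun hepp => by
    rw [hepp] at hec
    exact hec (by rw [pvIsIn_self p, Bool.true_or])
  rw [pvPrio_of_not_cond2 p s e hep hec] at hp
  by_cases h3 : (PySem.Str.startswith e s || PySem.Str.isIn s e) = true
  · rw [if_pos h3] at hp; injection hp with hp; omega
  · rw [if_neg h3] at hp; simp at hp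

-- tier 3: no tier-1/tier-2 entries anywhere => the fold computes A's third scan
theorem pvFold_scan3 (p s : String) (l : List String)
    (h : ∀ e ∈ l, ¬ (PySem.Str.isIn p e || PySem.Str.isIn e p) = true) :
    (l.foldl (pvStep p s) (4, none)).2 = pvScan3 s l := by
  induction l with
  | nil => rfl
  | cons x rest ih =>
    have hxc := h x (by simp)
    have hx : x ≠ p := fun hxp => by
      rw [hxp] at hxc
      exact hxc (by rw [pvIsIn_self p, Bool.true_or])
    have hrest : ∀ e ∈ rest, ¬ (PySem.Str.isIn p e || PySem.Str.isIn e p) = true :=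
      fun e' he' => h e' (by simp [he'])
    by_cases h3 : (PySem.Str.startswith x s || PySem.Str.isIn s x) = true
    · have hstep : pvStep p s (4, none) x = (3, some x) := by
        unfold pvStep
        rw [pvPrio_of_not_cond2 p s x hx hxc, if_pos h3]
        simp only
        rw [if_pos (by omega)]
      rw [List.foldl_cons, hstep]
      rw [pvFold_stable p s rest (3, some x) (pvPrio_ge_three p s rest hrest)]
      simp only [pvScan3]
      rw [if_pos h3]
    · have hstep : pvStep p s (4, none) x = (4, none) := by
        unfold pvStep
        rw [pvPrio_of_not_cond2 p s x hx hxc, if_neg h3]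
      rw [List.foldl_cons, hstep, ih hrest]
      simp only [pvScan3]
      rw [if_neg h3]

-- ===== VERDICT (by name: the statement is the Claim_ definition above) =====
theorem find_in_year_group_py_spec : Claim_equal_find_in_year_group_py := by
  intro p yg _
  unfold Spec_find_in_year_group_py
  have halt : find_in_year_group_py_alt p yg
      = (yg.foldl (pvStep p (PySem.Str.slice p none (some 10))) (4, none)).2 := rfl
  rw [halt]
  unfold find_in_year_group_py
  by_cases hm : p ∈ yg
  · rw [if_pos hm, pvFold_mem p _ yg (4, none) hm (by norm_num)]
  · rw [if_neg hm]
    cases h2 : pvScan2 p yg with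
    | some e =>
      rw [pvFold_scan2 p _ yg (4, none) e hm h2 (by norm_num)]
    | none =>
      rw [pvFold_scan3 p _ yg (pvScan2_none p yg h2)]
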